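-- pv_equiv track=rewrite | github.com/autogluon/autogluon | multimodal/src/autogluon/multimodal/utils/config.py | parse_dotlist_conf
-- ===== SOURCE A (Python) =====
-- def parse_dotlist_conf(conf):
--     """
--     Parse the config files that is potentially in the dotlist format to a dictionary.
--
--     Parameters
--     ----------
--     conf
--         Apply the conf stored as dotlist, e.g.,
--          'aaa=a, bbb=b' or ['aaa=a, ', 'bbb=b'] to {'aaa': 'a', 'bbb': b}
--
--     Returns
--     -------
--     new_conf
--     """
--     if isinstance(conf, str):
--         conf = conf.split()
--         need_parse = True
--     elif isinstance(conf, (list, tuple)):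
--         need_parse = True
--     elif isinstance(conf, dict):
--         need_parse = False
--     else:
--         raise ValueError(f"Unsupported format of conf={conf}")
--     if need_parse:
--         new_conf = dict()
--         curr_key = None
--         curr_value = ""
--         for ele in conf:
--             if "=" in ele:
--                 key, v = ele.split("=")
--                 if curr_key is not None:
--                     new_conf[curr_key] = curr_value
--                 curr_key = key
--                 curr_value = v
--             else:
--                 if curr_key is None:
--                     raise ValueError(f"Cannot parse the conf={conf}")
--                 curr_value = curr_value + " " + ele
--         if curr_key is not None:
--             new_conf[curr_key] = curr_value
--         return new_conf
--     else:
--         return conf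
-- ===== SOURCE B (Python) =====
-- def parse_dotlist_conf(conf):
--     """Two-phase variant: group tokens per '='-key first, then build the dict per group."""
--     if isinstance(conf, str):
--         conf = conf.split()
--         need_parse = True
--     elif isinstance(conf, (list, tuple)):
--         need_parse = True
--     elif isinstance(conf, dict):
--         need_parse = False
--     else:
--         raise ValueError(f"Unsupported format of conf={conf}")
--     if not need_parse:
--         return conf
--     # phase 1: every '='-token opens a new group; continuation tokens join the last group
--     groups = []
--     for ele in conf:
--         if "=" in ele:
--             groups.append([ele])
--         else:
--             if not groups:
--                 raise ValueError(f"Cannot parse the conf={conf}")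
--             groups[-1].append(ele)
--     # phase 2: one dict entry per group
--     new_conf = dict()
--     for grp in groups:
--         key, v = grp[0].split("=")
--         new_conf[key] = " ".join([v] + grp[1:])
--     return new_conf
-- ===== Notes on version B (the rewrite author's own statement) =====
-- stated objective: alternative
-- what changed: Replaces A's single fold that carries a pending key/value pair and flushes it into the dict on each new '='-token with a two-phase pass: first group tokens into per-key groups (a '='-token opens a group, continuations join the last one), then build the dict with one entry per group via ' '.join.
import Mathlib
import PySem

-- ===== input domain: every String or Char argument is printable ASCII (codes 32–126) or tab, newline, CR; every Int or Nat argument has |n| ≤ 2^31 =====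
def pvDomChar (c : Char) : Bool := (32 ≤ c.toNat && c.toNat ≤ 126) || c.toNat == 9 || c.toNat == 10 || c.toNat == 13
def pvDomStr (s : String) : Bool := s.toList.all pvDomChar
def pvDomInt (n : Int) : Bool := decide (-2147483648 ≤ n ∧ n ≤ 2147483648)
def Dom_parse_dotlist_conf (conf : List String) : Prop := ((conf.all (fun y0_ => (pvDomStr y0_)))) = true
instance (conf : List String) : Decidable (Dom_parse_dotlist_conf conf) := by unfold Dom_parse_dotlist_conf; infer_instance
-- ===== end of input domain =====

-- B replaces A's single pending-key fold by a two-phase pass (group tokens per key, then build the dict); objective: alternative decomposition.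

-- ===== PORT A =====
def parse_dotlist_conf (conf : List String) : List (String × String) :=
  let st := conf.foldl
    (fun (st : PySem.Dict String String × Option (String × String)) ele =>
      if PySem.Str.isIn "=" ele then
        let parts := (PySem.Str.split? ele "=").getD []
        let key := parts.getD 0 ""
        let v := parts.getD 1 ""
        let d := match st.2 with
          | some (k, cv) => st.1.insert k cv
          | none => st.1
        (d, some (key, v))
      else
        match st.2 with
        | some (k, cv) => (st.1, some (k, cv ++ " " ++ ele))
        | none => st  -- Python raises ValueError here; excluded by Pre_
    ) (PySem.Dict.empty, none)
  match st.2 with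
  | some (k, cv) => (st.1.insert k cv).items
  | none => st.1.items

-- ===== PORT B =====
def parse_dotlist_conf_alt (conf : List String) : List (String × String) :=
  let groups := conf.foldl
    (fun (gs : List (List String)) ele =>
      if PySem.Str.isIn "=" ele then gs ++ [[ele]]
      else gs.dropLast ++ [gs.getLastD [] ++ [ele]]  -- Python raises ValueError if gs = []; excluded by Pre_
    ) []
  (groups.foldl
    (fun (d : PySem.Dict String String) grp =>
      let parts := (PySem.Str.split? (grp.headD "") "=").getD []
      d.insert (parts.getD 0 "") (PySem.Str.join " " (parts.getD 1 "" :: grp.tail))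
    ) PySem.Dict.empty).items

-- ===== PRECONDITION & SPEC =====
-- Pre_ excludes exactly the inputs on which A raises ValueError: a first token without '='
-- (the 'Cannot parse' branch) or a token with more than one '=' (split-unpack fails).
def Pre_parse_dotlist_conf (conf : List String) : Prop :=
  (conf ≠ [] → PySem.Str.isIn "=" (conf.headD "") = true) ∧
  (∀ ele ∈ conf, PySem.Str.count ele "=" ≤ 1)
instance (conf : List String) : Decidable (Pre_parse_dotlist_conf conf) := by unfold Pre_parse_dotlist_conf; infer_instance
def pvWitness_parse_dotlist_conf : List String := ["aaa=a", "bbb=b", "c"]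

def Spec_parse_dotlist_conf (conf : List String) (out : List (String × String)) : Prop := out = parse_dotlist_conf_alt conf
instance (conf : List String) (out : List (String × String)) : Decidable (Spec_parse_dotlist_conf conf out) := by unfold Spec_parse_dotlist_conf; infer_instance

-- ===== CLAIM (what is proved, stated in full; the proofs are below) =====
def Claim_equal_parse_dotlist_conf : Prop := ∀ (conf : List String), Dom_parse_dotlist_conf conf → Pre_parse_dotlist_conf conf → Spec_parse_dotlist_conf conf (parse_dotlist_conf conf)

-- ===== LEMMAS AND PROOFS =====

-- proof-side names for the two folds' step functions (definitionally the lambdas in the ports)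
def pvAStep (st : PySem.Dict String String × Option (String × String)) (ele : String) :
    PySem.Dict String String × Option (String × String) :=
  if PySem.Str.isIn "=" ele then
    let parts := (PySem.Str.split? ele "=").getD []
    let key := parts.getD 0 ""
    let v := parts.getD 1 ""
    let d := match st.2 with
      | some (k, cv) => st.1.insert k cv
      | none => st.1
    (d, some (key, v))
  else
    match st.2 with
    | some (k, cv) => (st.1, some (k, cv ++ " " ++ ele))
    | none => st

def pvAFin (st : PySem.Dict String String × Option (String × String)) : PySem.Dict String String :=
  match st.2 with
  | some (k, cv) => st.1.insert k cv
  | none => st.1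

def pvBStep (gs : List (List String)) (ele : String) : List (List String) :=
  if PySem.Str.isIn "=" ele then gs ++ [[ele]]
  else gs.dropLast ++ [gs.getLastD [] ++ [ele]]

def pvBVal (d : PySem.Dict String String) (grp : List String) : PySem.Dict String String :=
  let parts := (PySem.Str.split? (grp.headD "") "=").getD []
  d.insert (parts.getD 0 "") (PySem.Str.join " " (parts.getD 1 "" :: grp.tail))

def pvBSec (d : PySem.Dict String String) (gs : List (List String)) : PySem.Dict String String :=
  gs.foldl pvBVal d

lemma pvChars_join_concat (s a : List Char) : ∀ (v : List Char) (xs : List (List Char)),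
    PySem.Chars.join s (v :: (xs ++ [a])) = PySem.Chars.join s (v :: xs) ++ s ++ a := by
  intro v xs
  induction xs generalizing v with
  | nil => simp [PySem.Chars.join_cons_cons, PySem.Chars.join_singleton]
  | cons x xs ih => simp [PySem.Chars.join_cons_cons, ih, List.append_assoc]

lemma pvJoin_singleton (x : String) : PySem.Str.join " " [x] = x := by
  simp [PySem.Str.join, PySem.Chars.join_singleton]

lemma pvJoin_concat (v : String) (xs : List String) (e : String) :
    PySem.Str.join " " (v :: (xs ++ [e])) = PySem.Str.join " " (v :: xs) ++ " " ++ e := by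
  simp only [PySem.Str.join, List.map_cons, List.map_append, List.map_cons, List.map_nil]
  rw [pvChars_join_concat]
  apply String.toList_inj.mp
  simp

lemma pvKey (rest : List String) : ∀ (gs : List (List String)) (h : String) (conts : List String)
    (d : PySem.Dict String String),
    pvAFin (List.foldl pvAStep
        (pvBSec d gs,
         some (((PySem.Str.split? h "=").getD []).getD 0 "",
               PySem.Str.join " " (((PySem.Str.split? h "=").getD []).getD 1 "" :: conts))) rest)
      = pvBSec d (List.foldl pvBStep (gs ++ [h :: conts]) rest) := by
  induction rest with
  | nil =>
    intro gs h conts d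
    simp [pvAFin, pvBSec, List.foldl_append, pvBVal]
  | cons e rest ih =>
    intro gs h conts d
    by_cases he : PySem.Chars.isIn ['='] e.toList = true
    · have h1 : pvAStep (pvBSec d gs,
          some (((PySem.Str.split? h "=").getD []).getD 0 "",
                PySem.Str.join " " (((PySem.Str.split? h "=").getD []).getD 1 "" :: conts))) e
        = (pvBSec d (gs ++ [h :: conts]),
           some (((PySem.Str.split? e "=").getD []).getD 0 "",
                 PySem.Str.join " " [((PySem.Str.split? e "=").getD []).getD 1 ""])) := by
        simp [pvAStep, he, pvBSec, List.foldl_append, pvBVal, pvJoin_singleton]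
      have h2 : pvBStep (gs ++ [h :: conts]) e = (gs ++ [h :: conts]) ++ [[e]] := by
        simp [pvBStep, he]
      rw [List.foldl_cons, h1, List.foldl_cons, h2]
      exact ih (gs ++ [h :: conts]) e [] d
    · have h1 : pvAStep (pvBSec d gs,
          some (((PySem.Str.split? h "=").getD []).getD 0 "",
                PySem.Str.join " " (((PySem.Str.split? h "=").getD []).getD 1 "" :: conts))) e
        = (pvBSec d gs,
           some (((PySem.Str.split? h "=").getD []).getD 0 "",
                 PySem.Str.join " " (((PySem.Str.split? h "=").getD []).getD 1 "" :: (conts ++ [e])))) := by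
        simp [pvAStep, he, pvJoin_concat]
      have h2 : pvBStep (gs ++ [h :: conts]) e = gs ++ [h :: (conts ++ [e])] := by
        simp [pvBStep, he]
      rw [List.foldl_cons, h1, List.foldl_cons, h2]
      exact ih gs h (conts ++ [e]) d

-- ===== VERDICT (by name: the statement is the Claim_ definition above) =====
theorem parse_dotlist_conf_spec : Claim_equal_parse_dotlist_conf := by
  intro conf _ hpre
  unfold Spec_parse_dotlist_conf
  cases conf with
  | nil => decide
  | cons h rest =>
    have hh : PySem.Chars.isIn ['='] h.toList = true := by
      simpa using hpre.1 (by simp)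
    have hmatch : ∀ st : PySem.Dict String String × Option (String × String),
        (match st.2 with
          | some (k, cv) => (st.1.insert k cv).items
          | none => st.1.items) = (pvAFin st).items := by
      rintro ⟨d, _ | ⟨k, v⟩⟩ <;> rfl
    have ha : parse_dotlist_conf (h :: rest)
        = (pvAFin (List.foldl pvAStep (PySem.Dict.empty, none) (h :: rest))).items := by
      rw [parse_dotlist_conf]
      exact hmatch _
    have hb : parse_dotlist_conf_alt (h :: rest)
        = (pvBSec PySem.Dict.empty (List.foldl pvBStep [] (h :: rest))).items := by
      unfold parse_dotlist_conf_alt pvBSec pvBVal pvBStep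
      rfl
    rw [ha, hb]
    have hstep1 : pvAStep (PySem.Dict.empty, none) h
        = (pvBSec PySem.Dict.empty [],
           some (((PySem.Str.split? h "=").getD []).getD 0 "",
                 PySem.Str.join " " (((PySem.Str.split? h "=").getD []).getD 1 "" :: []))) := by
      simp [pvAStep, hh, pvBSec, pvJoin_singleton]
    have hstep2 : pvBStep [] h = [] ++ [[h]] := by simp [pvBStep, hh]
    rw [List.foldl_cons, List.foldl_cons, hstep1, hstep2]
    rw [pvKey rest [] h [] PySem.Dict.empty]
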